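-- pv_equiv track=rewrite | github.com/KasiaKozdon/Advent_of_Code_2024 | Day4.py | find_xmas_string
-- ===== SOURCE A (Python) =====
-- def find_xmas_string(puzzle_input: list[str],
--                      x_stride: int = 1, y_stride: int = 0,
--                      starting_x: int = 0, starting_y: int = 0,
--                      str_to_find: str = "XMAS"):
--
--     x = starting_x
--     y = starting_y
--     for char_to_find in str_to_find:
--         # Checks assume that the lengtht of each row is the same, as in the provided examples
--         if x < 0 or y < 0 or y >= len(puzzle_input) or x >= len(puzzle_input[0]):
--             return 0
--         else:
--             if puzzle_input[y][x] == char_to_find: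
--                 x += x_stride
--                 y += y_stride
--             else:
--                 return 0
--     return 1
-- ===== SOURCE B (Python) =====
-- def find_xmas_string(puzzle_input: list[str],
--                      x_stride: int = 1, y_stride: int = 0,
--                      starting_x: int = 0, starting_y: int = 0,
--                      str_to_find: str = "XMAS"):
--     n = len(str_to_find)
--     if n == 0:
--         return 1
--     # one-shot bounds test: the path is a straight line, so if both endpoints
--     # are inside the grid every intermediate cell is too
--     for x, y in ((starting_x, starting_y),
--                  (starting_x + (n - 1) * x_stride, starting_y + (n - 1) * y_stride)):
--         if not (0 <= y < len(puzzle_input)):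
--             return 0
--         if not (0 <= x < len(puzzle_input[0])):
--             return 0
--     path = ''.join(puzzle_input[starting_y + i * y_stride][starting_x + i * x_stride]
--                    for i in range(n))
--     return 1 if path == str_to_find else 0
-- ===== Notes on version B (the rewrite author's own statement) =====
-- stated objective: alternative
-- what changed: Replaces A's interleaved per-character bounds-check-and-compare loop with a one-shot endpoint bounds test (the path is a straight line, so two in-bounds endpoints imply every step is in-bounds) followed by building the whole path string once and a single string comparison.
-- outside the precondition, e.g. on find_xmas_string(['XY', 'Z'], 0, 1, 1, 0, 'AB'): A returns 0, B raises IndexError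
import Mathlib
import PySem

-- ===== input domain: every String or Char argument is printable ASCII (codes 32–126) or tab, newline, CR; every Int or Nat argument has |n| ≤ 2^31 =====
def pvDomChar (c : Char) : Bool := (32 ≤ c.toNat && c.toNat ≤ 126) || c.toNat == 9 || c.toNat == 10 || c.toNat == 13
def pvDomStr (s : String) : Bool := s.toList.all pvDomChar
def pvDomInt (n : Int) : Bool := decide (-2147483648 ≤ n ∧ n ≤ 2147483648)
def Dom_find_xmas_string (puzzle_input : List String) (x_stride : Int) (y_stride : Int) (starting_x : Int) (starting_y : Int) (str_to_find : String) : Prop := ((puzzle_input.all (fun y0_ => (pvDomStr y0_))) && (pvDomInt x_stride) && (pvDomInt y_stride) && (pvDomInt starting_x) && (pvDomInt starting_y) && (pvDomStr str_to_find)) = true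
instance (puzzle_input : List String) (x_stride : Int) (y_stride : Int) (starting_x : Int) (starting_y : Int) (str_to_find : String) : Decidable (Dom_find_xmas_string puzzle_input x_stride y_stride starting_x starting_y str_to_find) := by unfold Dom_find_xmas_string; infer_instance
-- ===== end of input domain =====

-- B replaces A's interleaved per-character bounds-check-and-compare loop with a one-shot
-- endpoint bounds test plus a single build-the-path-then-compare pass (objective: alternative).

-- ===== PORT A =====
-- grid cell grid[y][x]; exact whenever 0 ≤ y < len(grid) and 0 ≤ x < len(grid[y]),
-- which holds at every use site admitted by Pre_ (the defaults are never the result there)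
def pvCell (puzzle_input : List String) (x y : Int) : Char :=
  ((puzzle_input.getD y.toNat "").toList).getD x.toNat ' '

-- width used by the Python: len(puzzle_input[0]); Python never evaluates it when the grid is
-- empty (the y-bound test short-circuits first), so headD "" is exact
def pvWidth (puzzle_input : List String) : Int :=
  ((puzzle_input.headD "").toList.length : Int)

-- the 'for char_to_find in str_to_find' loop of A, state (x, y)
def pvLoopA (puzzle_input : List String) (x_stride y_stride : Int) :
    List Char → Int → Int → Int
  | [], _, _ => 1
  | c :: cs, x, y =>
    if x < 0 ∨ y < 0 ∨ (puzzle_input.length : Int) ≤ y ∨ pvWidth puzzle_input ≤ x then 0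
    else if pvCell puzzle_input x y = c then
      pvLoopA puzzle_input x_stride y_stride cs (x + x_stride) (y + y_stride)
    else 0

def find_xmas_string (puzzle_input : List String) (x_stride : Int) (y_stride : Int) (starting_x : Int) (starting_y : Int) (str_to_find : String) : Int :=
  pvLoopA puzzle_input x_stride y_stride str_to_find.toList starting_x starting_y

-- ===== PORT B =====
-- the body of B's two-iteration bounds loop: y-bounds first, x-bounds (touching row 0's
-- length) only afterwards, exactly as Source B orders its two 'if' statements
def pvInGrid (puzzle_input : List String) (x y : Int) : Bool :=
  if ¬ (0 ≤ y ∧ y < (puzzle_input.length : Int)) then false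
  else if ¬ (0 ≤ x ∧ x < pvWidth puzzle_input) then false
  else true

-- Source B's body over the character list of str_to_find (n = len(str_to_find)):
-- early return on empty, endpoint bounds checks, then build the path and compare once
def pvAltGo (g : List String) (dx dy x0 y0 : Int) (cs : List Char) : Int :=
  if cs.length = 0 then 1
  else if ¬ pvInGrid g x0 y0 then 0
  else if ¬ pvInGrid g (x0 + ((cs.length : Int) - 1) * dx)
                (y0 + ((cs.length : Int) - 1) * dy) then 0
  else if (List.range cs.length).map
      (fun (i : Nat) => pvCell g (x0 + (i : Int) * dx) (y0 + (i : Int) * dy)) = cs then 1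
  else 0

def find_xmas_string_alt (puzzle_input : List String) (x_stride : Int) (y_stride : Int) (starting_x : Int) (starting_y : Int) (str_to_find : String) : Int :=
  pvAltGo puzzle_input x_stride y_stride starting_x starting_y str_to_find.toList

-- ===== PRECONDITION & SPEC =====
-- Pre_ excludes the inputs on which the walk's straight line, while inside the nominal box
-- (row 0's width and the grid height, the only bounds A tests), would index past the end of a
-- shorter row of a ragged grid: there Python raises IndexError (A whenever the preceding
-- characters match, B always, since B always builds the whole path); this also excludes some
-- ragged inputs where an earlier mismatch makes A stop first and return 0.
def Pre_find_xmas_string (puzzle_input : List String) (x_stride : Int) (y_stride : Int) (starting_x : Int) (starting_y : Int) (str_to_find : String) : Prop :=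
  ∀ i : Nat, i < str_to_find.toList.length →
    (0 ≤ starting_x + (i : Int) * x_stride ∧
     starting_x + (i : Int) * x_stride < pvWidth puzzle_input ∧
     0 ≤ starting_y + (i : Int) * y_stride ∧
     starting_y + (i : Int) * y_stride < (puzzle_input.length : Int)) →
    starting_x + (i : Int) * x_stride <
      (((puzzle_input.getD (starting_y + (i : Int) * y_stride).toNat "").toList.length : Int))
instance (puzzle_input : List String) (x_stride : Int) (y_stride : Int) (starting_x : Int) (starting_y : Int) (str_to_find : String) : Decidable (Pre_find_xmas_string puzzle_input x_stride y_stride starting_x starting_y str_to_find) := by unfold Pre_find_xmas_string; infer_instance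

def pvWitness_find_xmas_string : List String × Int × Int × Int × Int × String :=
  (["XMAS", "MMMM"], 1, 0, 0, 0, "XMAS")

def Spec_find_xmas_string (puzzle_input : List String) (x_stride : Int) (y_stride : Int) (starting_x : Int) (starting_y : Int) (str_to_find : String) (out : Int) : Prop := out = find_xmas_string_alt puzzle_input x_stride y_stride starting_x starting_y str_to_find
instance (puzzle_input : List String) (x_stride : Int) (y_stride : Int) (starting_x : Int) (starting_y : Int) (str_to_find : String) (out : Int) : Decidable (Spec_find_xmas_string puzzle_input x_stride y_stride starting_x starting_y str_to_find out) := by unfold Spec_find_xmas_string; infer_instance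

-- ===== CLAIM (what is proved, stated in full; the proofs are below) =====
def Claim_equal_find_xmas_string : Prop := ∀ (puzzle_input : List String) (x_stride : Int) (y_stride : Int) (starting_x : Int) (starting_y : Int) (str_to_find : String), Dom_find_xmas_string puzzle_input x_stride y_stride starting_x starting_y str_to_find → Pre_find_xmas_string puzzle_input x_stride y_stride starting_x starting_y str_to_find → Spec_find_xmas_string puzzle_input x_stride y_stride starting_x starting_y str_to_find (find_xmas_string puzzle_input x_stride y_stride starting_x starting_y str_to_find)

-- ===== LEMMAS AND PROOFS =====

-- the per-step condition A's loop enforces at step i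
def pvGood (puzzle_input : List String) (x y : Int) (c : Char) : Prop :=
  (0 ≤ x ∧ 0 ≤ y ∧ y < (puzzle_input.length : Int) ∧ x < pvWidth puzzle_input) ∧
    pvCell puzzle_input x y = c

lemma pvLoopA_zero_or_one (g : List String) (dx dy : Int) :
    ∀ (cs : List Char) (x y : Int), pvLoopA g dx dy cs x y = 0 ∨ pvLoopA g dx dy cs x y = 1 := by
  intro cs
  induction cs with
  | nil => intro x y; right; rfl
  | cons c cs ih =>
    intro x y
    simp only [pvLoopA]
    split_ifs with h1 h2
    · left; rfl
    · exact ih _ _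
    · left; rfl

lemma pvLoopA_eq_one_iff (g : List String) (dx dy : Int) :
    ∀ (cs : List Char) (x y : Int),
      pvLoopA g dx dy cs x y = 1 ↔
        ∀ i : Nat, (h : i < cs.length) →
          pvGood g (x + (i : Int) * dx) (y + (i : Int) * dy) cs[i] := by
  intro cs
  induction cs with
  | nil => intro x y; simp [pvLoopA]
  | cons c cs ih =>
    intro x y
    simp only [pvLoopA]
    split_ifs with h1 h2
    · constructor
      · intro h; exact absurd h (by norm_num)
      · intro h
        have hg := h 0 (by simp)
        simp only [Int.natCast_zero, zero_mul, add_zero] at hg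
        obtain ⟨⟨hx, hy, hyl, hxw⟩, -⟩ := hg
        rcases h1 with h | h | h | h <;> omega
    · rw [ih]
      have h1' : 0 ≤ x ∧ 0 ≤ y ∧ y < (g.length : Int) ∧ x < pvWidth g := by omega
      constructor
      · intro h i hi
        match i with
        | 0 =>
          simp only [Int.natCast_zero, zero_mul, add_zero]
          exact ⟨h1', h2⟩
        | j + 1 =>
          have hj := h j (by simpa using hi)
          have ex : x + dx + (j : Int) * dx = x + ((j : Int) + 1) * dx := by ring
          have ey : y + dy + (j : Int) * dy = y + ((j : Int) + 1) * dy := by ring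
          rw [ex, ey] at hj
          simpa using hj
      · intro h j hj
        have hj1 := h (j + 1) (by simpa using hj)
        have ex : x + dx + (j : Int) * dx = x + ((j : Int) + 1) * dx := by ring
        have ey : y + dy + (j : Int) * dy = y + ((j : Int) + 1) * dy := by ring
        rw [ex, ey]
        simpa using hj1
    · constructor
      · intro h; exact absurd h (by norm_num)
      · intro h
        have hg := h 0 (by simp)
        simp only [Int.natCast_zero, zero_mul, add_zero] at hg
        exact absurd hg.2 h2

-- a straight monotone line: if both endpoints of n steps lie in [0, L), every step does
lemma pvBetween (y0 dy L : Int) (n i : Nat) (hi : i < n)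
    (h0 : 0 ≤ y0 ∧ y0 < L)
    (h1 : 0 ≤ y0 + ((n : Int) - 1) * dy ∧ y0 + ((n : Int) - 1) * dy < L) :
    0 ≤ y0 + (i : Int) * dy ∧ y0 + (i : Int) * dy < L := by
  have hin : (i : Int) ≤ (n : Int) - 1 := by omega
  have hip : (0 : Int) ≤ (i : Int) := by positivity
  by_cases hdy : 0 ≤ dy
  · have hlo : (0 : Int) ≤ (i : Int) * dy := mul_nonneg hip hdy
    have hhi : (i : Int) * dy ≤ ((n : Int) - 1) * dy := mul_le_mul_of_nonneg_right hin hdy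
    omega
  · have hdy' : dy < 0 := by omega
    have hlo : ((n : Int) - 1) * dy ≤ (i : Int) * dy := by nlinarith
    have hhi : (i : Int) * dy ≤ 0 := by nlinarith
    omega

lemma map_range_eq_iff {α : Type} (f : Nat → α) (l : List α) :
    (List.range l.length).map f = l ↔ ∀ i : Nat, (h : i < l.length) → f i = l[i] := by
  constructor
  · intro h i hi
    have h' : ((List.range l.length).map f)[i]? = l[i]? := by rw [h]
    rw [List.getElem?_eq_getElem (by simpa using hi), List.getElem?_eq_getElem hi] at h'
    simpa using h'
  · intro h
    apply List.ext_getElem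
    · simp
    · intro i h1 h2
      simpa using h i h2

lemma inGrid_iff (g : List String) (x y : Int) :
    pvInGrid g x y = true ↔
      (0 ≤ x ∧ 0 ≤ y ∧ y < (g.length : Int) ∧ x < pvWidth g) := by
  unfold pvInGrid
  split_ifs with h1 h2
  · constructor
    · intro _; exact ⟨h2.1, h1.1, h1.2, h2.2⟩
    · intro _; rfl
  · constructor
    · intro h; simp at h
    · intro h; exact absurd ⟨h.1, h.2.2.2⟩ h2
  · constructor
    · intro h; simp at h
    · intro h; exact absurd ⟨h.2.1, h.2.2.1⟩ h1

lemma pvAltGo_eq_one_iff (g : List String) (dx dy x0 y0 : Int) (cs : List Char) :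
    pvAltGo g dx dy x0 y0 cs = 1 ↔
      (cs.length = 0 ∨
        (pvInGrid g x0 y0 = true ∧
         pvInGrid g (x0 + ((cs.length : Int) - 1) * dx)
                    (y0 + ((cs.length : Int) - 1) * dy) = true ∧
         ∀ i : Nat, (h : i < cs.length) →
           pvCell g (x0 + (i : Int) * dx) (y0 + (i : Int) * dy) = cs[i])) := by
  unfold pvAltGo
  split_ifs with h1 h2 h3 h4
  · simp [h1]
  · have hm := (map_range_eq_iff
      (fun i => pvCell g (x0 + (i : Int) * dx) (y0 + (i : Int) * dy)) cs).mp h4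
    constructor
    · intro _; exact Or.inr ⟨h2, h3, fun i hi => hm i hi⟩
    · intro _; rfl
  · constructor
    · intro h; exact absurd h (by norm_num)
    · rintro (h | ⟨-, -, hmatch⟩)
      · exact absurd h h1
      · exact absurd ((map_range_eq_iff _ cs).mpr hmatch) h4
  · constructor
    · intro h; exact absurd h (by norm_num)
    · rintro (h | ⟨-, hend, -⟩)
      · exact absurd h h1
      · exact absurd hend h3
  · constructor
    · intro h; exact absurd h (by norm_num)
    · rintro (h | ⟨hstart, -, -⟩)
      · exact absurd h h1
      · exact absurd hstart h2

lemma pvAltGo_zero_or_one (g : List String) (dx dy x0 y0 : Int) (cs : List Char) :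
    pvAltGo g dx dy x0 y0 cs = 0 ∨ pvAltGo g dx dy x0 y0 cs = 1 := by
  unfold pvAltGo
  split_ifs <;> simp

lemma main_eq_one_iff_alt (g : List String) (dx dy x0 y0 : Int) (s : String) :
    find_xmas_string g dx dy x0 y0 s = 1 ↔ find_xmas_string_alt g dx dy x0 y0 s = 1 := by
  unfold find_xmas_string find_xmas_string_alt
  rw [pvAltGo_eq_one_iff, pvLoopA_eq_one_iff]
  set cs := s.toList with hcs
  rcases Nat.eq_zero_or_pos cs.length with hn | hn
  · simp [List.length_eq_zero_iff.mp hn]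
  · constructor
    · intro h
      right
      have h0 := h 0 (by omega)
      have hl := h (cs.length - 1) (by omega)
      simp only [Int.natCast_zero, zero_mul, add_zero] at h0
      have hc : ((cs.length - 1 : Nat) : Int) = (cs.length : Int) - 1 := by omega
      rw [hc] at hl
      refine ⟨(inGrid_iff _ _ _).mpr h0.1, (inGrid_iff _ _ _).mpr hl.1, ?_⟩
      intro i hi
      exact (h i hi).2
    · rintro (h | ⟨hin0, hin1, hmatch⟩)
      · omega
      · intro i hi
        rw [inGrid_iff] at hin0 hin1
        have hx := pvBetween x0 dx (pvWidth g) cs.length i hi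
          ⟨hin0.1, hin0.2.2.2⟩ ⟨hin1.1, hin1.2.2.2⟩
        have hy := pvBetween y0 dy (g.length : Int) cs.length i hi
          ⟨hin0.2.1, hin0.2.2.1⟩ ⟨hin1.2.1, hin1.2.2.1⟩
        exact ⟨⟨hx.1, hy.1, hy.2, hx.2⟩, hmatch i hi⟩

-- ===== VERDICT (by name: the statement is the Claim_ definition above) =====
theorem find_xmas_string_spec : Claim_equal_find_xmas_string := by
  intro g dx dy x0 y0 s _ _
  unfold Spec_find_xmas_string
  have h := main_eq_one_iff_alt g dx dy x0 y0 s
  rcases pvLoopA_zero_or_one g dx dy s.toList x0 y0 with hA | hA <;>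
    rcases pvAltGo_zero_or_one g dx dy x0 y0 s.toList with hB | hB <;>
      unfold find_xmas_string find_xmas_string_alt at * <;> omega
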